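-- pv_equiv track=rewrite | github.com/gauravharsha/drudge-exts | agp_fermions/agp_fermi.py | _delta_map
-- ===== SOURCE A (Python) =====
-- def _delta_map(input_substs):
--     """Function takes in a dictionary of substitutions and creates a set of
--     connected lists of indices of the KroneckerDeltas
--     """
--
--     substs = input_substs.copy()
--
--     # First get the keys of the dictionary
--     dict_keys = list(substs.keys())
--
--     # Start with the first key - see where it points to and see if the
--     # substituting index is itself in the keys
--
--     delta_lists = []
--     new_list = []
--
--     # Starting Key
--     key = dict_keys[-1]
--     new_list = [key, ]
--
--     while dict_keys:
--
--         # First form a small list with the first two indices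
--         val = substs[key]
--         new_list.append(val)
--
--         # remove these entries from the dict
--         dict_keys.remove(key)
--         del substs[key]
--
--         if val in dict_keys:
--
--             # Update the elements
--             key = val
--             continue
--
--         else:
--
--             # Can't extend anymore
--             new_set = set(new_list)
--             lst_added = False
--
--             if not delta_lists:
--                 delta_lists.append(new_set)
--             else:
--                 lst_ind = 0
--                 for lst in delta_lists:
--                     ovlp = list(set(lst) & set(new_set))
--                     if ovlp:
--                         delta_lists[lst_ind] = delta_lists[lst_ind].union(
--                             new_set
--                         )
--                         lst_added = True
--                         break
--                     lst_ind += 1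
--                 if lst_added is False:
--                     delta_lists.append(new_set)
--
--             if dict_keys:
--                 key = dict_keys[-1]
--                 new_list = [key, ]
--
--     return delta_lists
-- ===== SOURCE B (Python) =====
-- def _delta_map(input_substs):
--     """Group Kronecker-delta substitution chains into connected sets.
--
--     Single backward pass over the keys with a 'consumed' set (O(1) membership
--     instead of list.remove / 'val in list') and an element->group-index dict so
--     the first overlapping group is found without scanning all groups.
--     """
--     substs = dict(input_substs)
--     keys = list(substs.keys())
--
--     groups = []          # list of sets (the result)
--     where = {}           # element -> least index of a group containing it
--     consumed = set()     # keys whose chain has already been emitted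
--
--     for k in reversed(keys):
--         if k in consumed:
--             continue
--         # follow the substitution chain starting at k
--         chain = [k]
--         while True:
--             consumed.add(chain[-1])
--             v = substs[chain[-1]]
--             chain.append(v)
--             if v in substs and v not in consumed:
--                 continue
--             break
--         hits = [where[e] for e in chain if e in where]
--         if hits:
--             tgt = min(hits)
--             groups[tgt] |= set(chain)
--         else:
--             tgt = len(groups)
--             groups.append(set(chain))
--         for e in chain:
--             where[e] = tgt
--     return groups
-- ===== Notes on version B (the rewrite author's own statement) =====
-- stated objective: faster
-- what changed: B replaces A's repeated list.remove/'val in list' scans and the per-chain linear scan over all delta_lists with a single backward pass over the keys using a consumed-set for O(1) membership and an element-to-group-index dict that locates the first overlapping group without scanning the groups.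
import Mathlib
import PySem

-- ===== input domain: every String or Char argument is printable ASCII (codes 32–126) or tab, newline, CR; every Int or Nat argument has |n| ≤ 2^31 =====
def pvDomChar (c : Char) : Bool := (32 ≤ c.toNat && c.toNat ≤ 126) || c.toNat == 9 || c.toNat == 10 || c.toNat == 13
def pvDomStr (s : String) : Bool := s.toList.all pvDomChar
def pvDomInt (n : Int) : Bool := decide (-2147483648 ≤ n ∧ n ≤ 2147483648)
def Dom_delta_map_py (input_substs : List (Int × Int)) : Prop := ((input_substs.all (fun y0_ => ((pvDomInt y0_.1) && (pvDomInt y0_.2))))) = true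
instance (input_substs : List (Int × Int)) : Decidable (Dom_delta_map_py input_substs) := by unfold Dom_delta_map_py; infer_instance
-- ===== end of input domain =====

-- B groups the delta-substitution chains in one backward pass, using a consumed-set and an
-- element→group-index dict instead of A's list.remove and per-chain scan over all groups (objective: faster).


-- ===== PORT A =====

-- the 'for lst in delta_lists: … break' overlap scan (lst_ind / lst_added bookkeeping becomes the acc prefix)
def aMergeScan (new_set : PySem.Set Int) (acc : List (PySem.Set Int)) :
    List (PySem.Set Int) → List (PySem.Set Int)
  | [] => acc ++ [new_set]                        -- lst_added stayed False: append
  | lst :: rest =>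
    let ovlp := PySem.Set.inter (PySem.Set.ofList lst) (PySem.Set.ofList new_set)
    if ovlp ≠ [] then acc ++ (PySem.Set.union lst new_set) :: rest   -- delta_lists[lst_ind] |= new_set; break
    else aMergeScan new_set (acc ++ [lst]) rest

-- the 'if not delta_lists: … else: …' merge block of A
def aMerge (delta_lists : List (PySem.Set Int)) (new_set : PySem.Set Int) : List (PySem.Set Int) :=
  if delta_lists = [] then delta_lists ++ [new_set]
  else aMergeScan new_set [] delta_lists

-- the 'while dict_keys:' loop; fuel only makes it total (each real iteration removes key from dict_keys)
def aLoop : Nat → List Int → PySem.Dict Int Int → List (PySem.Set Int) → Int → List Int →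
    List (PySem.Set Int)
  | 0, _, _, delta_lists, _, _ => delta_lists
  | fuel+1, dict_keys, substs, delta_lists, key, new_list =>
    if dict_keys = [] then delta_lists
    else
      let val := (substs.get? key).getD 0                              -- substs[key] (key always present)
      let new_list := new_list ++ [val]
      let dict_keys := (PySem.List.remove? dict_keys key).getD dict_keys  -- dict_keys.remove(key) (always present)
      let substs := substs.erase key                                   -- del substs[key]
      if dict_keys.contains val then
        aLoop fuel dict_keys substs delta_lists val new_list
      else
        let new_set := PySem.Set.ofList new_list
        let delta_lists := aMerge delta_lists new_set
        match dict_keys.getLast? with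
        | none => delta_lists                                          -- while-condition fails: return
        | some k => aLoop fuel dict_keys substs delta_lists k [k]      -- key = dict_keys[-1]; new_list = [key]

def delta_map_py (input_substs : List (Int × Int)) : List (List Int) :=
  let substs := PySem.Dict.ofList input_substs
  let dict_keys := substs.keys
  let key := (PySem.List.pyGet? dict_keys (-1)).getD 0                 -- dict_keys[-1]; IndexError on [] is excluded by Pre_
  aLoop (dict_keys.length + 1) dict_keys substs [] key [key]

-- ===== PORT B =====

-- the inner 'while True:' chain-following loop of B (fuel only makes it total)
def bChain : Nat → PySem.Set Int → PySem.Dict Int Int → List Int → (List Int × PySem.Set Int)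
  | 0, consumed, _, chain => (chain, consumed)
  | fuel+1, consumed, substs, chain =>
    let last := (PySem.List.pyGet? chain (-1)).getD 0                  -- chain[-1] (chain never empty)
    let consumed := PySem.Set.add consumed last
    let v := (substs.get? last).getD 0                                 -- substs[chain[-1]] (always present)
    let chain := chain ++ [v]
    if substs.contains v && !(PySem.Set.contains consumed v) then
      bChain fuel consumed substs chain
    else (chain, consumed)

-- one iteration of B's 'for k in reversed(keys):' loop; state = (groups, where, consumed)
def bStep (substs : PySem.Dict Int Int) (fuel : Nat)
    (st : List (PySem.Set Int) × PySem.Dict Int Int × PySem.Set Int) (k : Int) :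
    List (PySem.Set Int) × PySem.Dict Int Int × PySem.Set Int :=
  let (groups, wher, consumed) := st
  if PySem.Set.contains consumed k then st
  else
    let (chain, consumed) := bChain fuel consumed substs [k]
    let hits := (chain.filter (fun e => wher.contains e)).map (fun e => (wher.get? e).getD 0)
    if hits ≠ [] then
      let tgt := (PySem.List.min? hits (fun x => x)).getD 0            -- min(hits)
      let groups := PySem.List.pySetD groups tgt
        (PySem.Set.union (PySem.List.pyGetD groups tgt []) (PySem.Set.ofList chain))  -- groups[tgt] |= set(chain)
      (groups, chain.foldl (fun w e => w.insert e tgt) wher, consumed)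
    else
      let tgt := (groups.length : Int)
      let groups := groups ++ [PySem.Set.ofList chain]
      (groups, chain.foldl (fun w e => w.insert e tgt) wher, consumed)

def delta_map_py_alt (input_substs : List (Int × Int)) : List (List Int) :=
  let substs := PySem.Dict.ofList input_substs
  let keys := substs.keys
  (keys.reverse.foldl (bStep substs (substs.size + 1)) ([], PySem.Dict.empty, PySem.Set.empty)).1

-- ===== PRECONDITION & SPEC =====
-- Pre_ excludes only the empty dict, on which A raises IndexError at 'dict_keys[-1]'.
def Pre_delta_map_py (input_substs : List (Int × Int)) : Prop := input_substs ≠ []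
instance (input_substs : List (Int × Int)) : Decidable (Pre_delta_map_py input_substs) := by
  unfold Pre_delta_map_py; infer_instance

def pvWitness_delta_map_py : (List (Int × Int)) := [(1, 2), (3, 2), (5, 1)]

def Spec_delta_map_py (input_substs : List (Int × Int)) (out : List (List Int)) : Prop :=
  out = delta_map_py_alt input_substs
instance (input_substs : List (Int × Int)) (out : List (List Int)) :
    Decidable (Spec_delta_map_py input_substs out) := by unfold Spec_delta_map_py; infer_instance

-- ===== CLAIM (what is proved, stated in full; the proofs are below) =====
def Claim_equal_delta_map_py : Prop := ∀ (input_substs : List (Int × Int)),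
  Dom_delta_map_py input_substs → Pre_delta_map_py input_substs →
  Spec_delta_map_py input_substs (delta_map_py input_substs)

-- ===== LEMMAS AND PROOFS =====

-- ---------- proof-only helper predicates ----------

-- n is the least index of a group of `groups` containing e
@[reducible] def LeastIdx (groups : List (PySem.Set Int)) (e : Int) (n : Nat) : Prop :=
  (∃ g, groups[n]? = some g ∧ e ∈ g) ∧ ∀ j, j < n → ∀ g, groups[j]? = some g → e ∉ g

-- the where-map of B stores, for every element of some group, the least index of a group containing it
@[reducible] def WhereInv (groups : List (PySem.Set Int)) (wher : PySem.Dict Int Int) : Prop :=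
  ∀ e : Int,
    (wher.get? e = none → ∀ (j : Nat) (g : PySem.Set Int), groups[j]? = some g → e ∉ g) ∧
    (∀ i, wher.get? e = some i → ∃ n : Nat, i = (n : Int) ∧ LeastIdx groups e n)

-- the hits list of B for a chain
@[reducible] def bHits (wher : PySem.Dict Int Int) (ch : List Int) : List Int :=
  (ch.filter (fun e => wher.contains e)).map (fun e => (wher.get? e).getD 0)

-- ---------- small library-style facts ----------

theorem pv_pyGet_neg_one {α : Type} (ch : List α) (h : ch ≠ []) :
    PySem.List.pyGet? ch (-1) = ch.getLast? := by
  have hlen : 0 < ch.length := List.length_pos_iff.mpr h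
  have h1 : ¬ (0:Int) ≤ -1 := by norm_num
  have h2 : -(ch.length:Int) ≤ -1 := by omega
  simp only [PySem.List.pyGet?, PySem.List.pyIdx?, if_neg h1, if_pos h2,
    List.getLast?_eq_getElem?]
  norm_num

theorem pv_find?_filter_ne (items : List (Int × Int)) (k x : Int) :
    List.find? (fun p => p.1 == x) (items.filter (fun p => !(p.1 == k)))
      = if x = k then none else List.find? (fun p => p.1 == x) items := by
  induction items with
  | nil => simp only [List.filter_nil, List.find?_nil]; split <;> rfl
  | cons p rest ih =>
    rw [List.filter_cons]
    by_cases hpk : p.1 = k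
    · rw [if_neg (by simp [hpk]), ih]
      by_cases hxk : x = k
      · simp [hxk]
      · rw [if_neg hxk, if_neg hxk,
          show List.find? (fun q => q.1 == x) (p :: rest) = List.find? (fun q => q.1 == x) rest
            from List.find?_cons_of_neg (by simp [hpk]; omega)]
    · rw [if_pos (by simp [hpk])]
      cases hpx : (p.1 == x) with
      | true =>
        have hxk : ¬ x = k := by
          have := eq_of_beq hpx
          omega
        rw [if_neg hxk,
          show List.find? (fun q => q.1 == x) (p :: List.filter (fun q => !(q.1 == k)) rest)
              = some p from List.find?_cons_of_pos hpx,
          show List.find? (fun q => q.1 == x) (p :: rest) = some p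
            from List.find?_cons_of_pos hpx]
      | false =>
        rw [show List.find? (fun q => q.1 == x) (p :: List.filter (fun q => !(q.1 == k)) rest)
              = List.find? (fun q => q.1 == x) (List.filter (fun q => !(q.1 == k)) rest)
            from List.find?_cons_of_neg (by simp [hpx]), ih]
        by_cases hxk : x = k
        · simp [hxk]
        · rw [if_neg hxk, if_neg hxk,
            show List.find? (fun q => q.1 == x) (p :: rest) = List.find? (fun q => q.1 == x) rest
              from List.find?_cons_of_neg (by simp [hpx])]

theorem pv_get?_erase (d : PySem.Dict Int Int) (k x : Int) :
    (d.erase k).get? x = if x = k then none else d.get? x := by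
  obtain ⟨items⟩ := d
  simp only [PySem.Dict.erase, PySem.Dict.get?]
  rw [pv_find?_filter_ne]
  split <;> rfl

theorem pv_remove?_getD_of_mem (l : List Int) (a : Int) (h : a ∈ l) :
    (PySem.List.remove? l a).getD l = l.erase a := by
  rw [List.erase_eq_eraseIdx]
  rcases hi : List.idxOf? a l with _ | i
  · rw [List.idxOf?_eq_none_iff] at hi
    exact absurd h hi
  · simp [PySem.List.remove?, hi]

theorem pv_filter_add_consumed (keys : List Int) (c : PySem.Set Int) (k : Int) :
    (keys.filter (fun x => !(PySem.Set.contains c x))).filter (fun x => x != k)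
      = keys.filter (fun x => !(PySem.Set.contains (PySem.Set.add c k) x)) := by
  rw [List.filter_filter]
  apply List.filter_congr
  intro x _
  have hadd := PySem.Set.mem_add (s := c) (x := k) (y := x)
  by_cases h1 : x = k <;> by_cases h2 : x ∈ c <;>
    simp [PySem.Set.contains, h1, h2, hadd]

theorem pv_getLast?_filter (keys done rest : List Int) (c : PySem.Set Int) (k : Int)
    (hrev : keys.reverse = done ++ k :: rest)
    (hdone : ∀ x ∈ done, x ∈ c) (hk : k ∉ c) :
    (keys.filter (fun x => !(PySem.Set.contains c x))).getLast? = some k := by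
  rw [List.getLast?_eq_head?_reverse, ← List.filter_reverse, hrev, List.filter_append]
  have hnil : done.filter (fun x => !(PySem.Set.contains c x)) = [] := by
    rw [List.filter_eq_nil_iff]
    intro x hx
    simp [PySem.Set.contains, hdone x hx]
  rw [hnil, List.nil_append, List.filter_cons]
  simp [PySem.Set.contains, hk]

theorem pv_get?_foldl_insert_const (chain : List Int) (w : PySem.Dict Int Int) (t x : Int) :
    ((chain.foldl (fun w e => w.insert e t) w).get? x) = if x ∈ chain then some t else w.get? x := by
  induction chain generalizing w with
  | nil => simp
  | cons e ch ih =>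
    rw [List.foldl_cons, ih, PySem.Dict.get?_insert]
    by_cases h1 : x ∈ ch <;> by_cases h2 : x = e <;> simp [h1, h2]

def pvMinStep : Option Int → Int → Option Int := fun acc x =>
  match acc with
  | none => some x
  | some m => if x < m then some x else some m

theorem pv_min_foldl_some_mem (xs : List Int) (a : Int) :
    ∃ b, xs.foldl pvMinStep (some a) = some b ∧ (b = a ∨ b ∈ xs) := by
  induction xs generalizing a with
  | nil => exact ⟨a, rfl, Or.inl rfl⟩
  | cons x xs ih =>
    rw [List.foldl_cons]
    have hred : pvMinStep (some a) x = if x < a then some x else some a := rfl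
    rw [hred]
    by_cases h : x < a
    · rw [if_pos h]
      obtain ⟨b, hb, hmem⟩ := ih x
      exact ⟨b, hb, by rcases hmem with h' | h' <;> simp [h']⟩
    · rw [if_neg h]
      obtain ⟨b, hb, hmem⟩ := ih a
      exact ⟨b, hb, by rcases hmem with h' | h' <;> simp [h']⟩

theorem pv_min?_eq_foldl (xs : List Int) :
    PySem.List.min? xs (fun x => x) = xs.foldl pvMinStep none := by
  show xs.foldl _ none = xs.foldl _ none
  congr 1
  funext acc x
  cases acc <;> rfl

theorem pv_min?_spec (hits : List Int) (h : hits ≠ []) :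
    ∃ m, PySem.List.min? hits (fun x => x) = some m ∧ m ∈ hits ∧ ∀ y ∈ hits, m ≤ y := by
  rcases hits with _ | ⟨x, xs⟩
  · exact absurd rfl h
  · obtain ⟨b, hb, hmem⟩ := pv_min_foldl_some_mem xs x
    have hmin : PySem.List.min? (x :: xs) (fun x => x) = some b := by
      rw [pv_min?_eq_foldl, List.foldl_cons]
      exact hb
    refine ⟨b, hmin, ?_, fun y hy => PySem.List.min?_isMin hmin y hy⟩
    rcases hmem with h' | h' <;> simp [h']

theorem pv_inter_ne_nil_iff (g : PySem.Set Int) (t : List Int) :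
    (PySem.Set.inter (PySem.Set.ofList g) (PySem.Set.ofList t) ≠ []) ↔ ∃ e, e ∈ g ∧ e ∈ t := by
  simp only [PySem.Set.inter]
  constructor
  · intro h
    obtain ⟨x, hx⟩ := List.exists_mem_of_ne_nil _ h
    obtain ⟨hx1, hx2⟩ := List.mem_filter.mp hx
    refine ⟨x, (PySem.Set.mem_ofList _ _).mp hx1, ?_⟩
    have : x ∈ PySem.Set.ofList t := by simpa [PySem.Set.contains] using hx2
    exact (PySem.Set.mem_ofList _ _).mp this
  · rintro ⟨e, hg, ht⟩ hnil
    have : e ∈ List.filter (fun x => (PySem.Set.ofList t).contains x) (PySem.Set.ofList g) := by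
      refine List.mem_filter.mpr ⟨(PySem.Set.mem_ofList _ _).mpr hg, ?_⟩
      simp [PySem.Set.contains, (PySem.Set.mem_ofList _ _).mpr ht]
    rw [hnil] at this
    exact absurd this (List.not_mem_nil)

-- ---------- merge-step lemmas ----------

theorem pv_aMergeScan_no_overlap (ch : List Int) (ns : PySem.Set Int)
    (hmem : ∀ e, e ∈ ns ↔ e ∈ ch) :
    ∀ (dl acc : List (PySem.Set Int)), (∀ g ∈ dl, ∀ e ∈ ch, e ∉ g) →
      aMergeScan ns acc dl = acc ++ dl ++ [ns] := by
  intro dl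
  induction dl with
  | nil => intro acc _; simp [aMergeScan]
  | cons lst rest ih =>
    intro acc hdisj
    rw [aMergeScan]
    have hno : ¬ (PySem.Set.inter (PySem.Set.ofList lst) (PySem.Set.ofList ns) ≠ []) := by
      rw [pv_inter_ne_nil_iff]
      rintro ⟨e, he1, he2⟩
      exact hdisj lst (by simp) e ((hmem e).mp he2) he1
    rw [if_neg hno, ih (acc ++ [lst]) (fun g hg => hdisj g (by simp [hg]))]
    simp

theorem pv_aMergeScan_first_overlap (ch : List Int) (ns : PySem.Set Int)
    (hmem : ∀ e, e ∈ ns ↔ e ∈ ch) :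
    ∀ (dl : List (PySem.Set Int)) (n : Nat) (acc : List (PySem.Set Int)) (g : PySem.Set Int),
      dl[n]? = some g → (∃ e, e ∈ ch ∧ e ∈ g) →
      (∀ j, j < n → ∀ g', dl[j]? = some g' → ∀ e ∈ ch, e ∉ g') →
      aMergeScan ns acc dl = acc ++ dl.set n (PySem.Set.union g ns) := by
  intro dl
  induction dl with
  | nil => intro n acc g hg; simp at hg
  | cons lst rest ih =>
    intro n acc g hg hov hpre
    rw [aMergeScan]
    cases n with
    | zero =>
      have hg' : lst = g := by simpa using hg
      have hyes : PySem.Set.inter (PySem.Set.ofList lst) (PySem.Set.ofList ns) ≠ [] := by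
        rw [pv_inter_ne_nil_iff]
        obtain ⟨e, he1, he2⟩ := hov
        refine ⟨e, ?_, (hmem e).mpr he1⟩
        rw [hg']
        exact he2
      rw [if_pos hyes, hg']
      simp
    | succ n =>
      have hno : ¬ (PySem.Set.inter (PySem.Set.ofList lst) (PySem.Set.ofList ns) ≠ []) := by
        rw [pv_inter_ne_nil_iff]
        rintro ⟨e, he1, he2⟩
        exact hpre 0 (Nat.succ_pos n) lst rfl e ((hmem e).mp he2) he1
      rw [if_neg hno]
      rw [ih n (acc ++ [lst]) g (by simpa using hg) hov
        (fun j hj g' hg' => hpre (j+1) (by omega) g' (by simpa using hg'))]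
      simp

-- hits = [] means no element of the chain lies in any existing group
theorem pv_hits_nil (groups : List (PySem.Set Int)) (wher : PySem.Dict Int Int) (ch : List Int)
    (hW : WhereInv groups wher) (h : bHits wher ch = []) :
    ∀ (j : Nat) (g : PySem.Set Int), groups[j]? = some g → ∀ e ∈ ch, e ∉ g := by
  intro j g hg e he
  have hfil : ch.filter (fun e => wher.contains e) = [] := by
    unfold bHits at h
    exact List.map_eq_nil_iff.mp h
  have hnc : wher.contains e = false := by
    by_contra hc
    have : e ∈ ch.filter (fun e => wher.contains e) :=
      List.mem_filter.mpr ⟨he, by simpa using hc⟩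
    rw [hfil] at this
    exact absurd this (List.not_mem_nil)
  have hnone : wher.get? e = none := by
    cases hcase : wher.get? e with
    | none => rfl
    | some i =>
      have := PySem.Dict.contains_eq_isSome_get? (d := wher) (k := e)
      rw [hnc, hcase] at this
      simp at this
  exact (hW e).1 hnone j g hg

-- hits ≠ [] : min(hits) is the least index of a group overlapping the chain
theorem pv_hits_min (groups : List (PySem.Set Int)) (wher : PySem.Dict Int Int) (ch : List Int)
    (hW : WhereInv groups wher) (h : bHits wher ch ≠ []) :
    ∃ (n : Nat) (g : PySem.Set Int),
      (PySem.List.min? (bHits wher ch) (fun x => x)).getD 0 = (n : Int) ∧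
      groups[n]? = some g ∧ (∃ e, e ∈ ch ∧ e ∈ g) ∧
      (∀ j, j < n → ∀ g', groups[j]? = some g' → ∀ e ∈ ch, e ∉ g') := by
  obtain ⟨m, hm, hmmem, hmle⟩ := pv_min?_spec _ h
  -- m is a value of the where-map at some chain element
  obtain ⟨e, hech, hei⟩ : ∃ e, e ∈ ch ∧ (wher.contains e = true ∧ (wher.get? e).getD 0 = m) := by
    obtain ⟨e, he1, he2⟩ := List.mem_map.mp hmmem
    exact ⟨e, (List.mem_filter.mp he1).1, by simpa using (List.mem_filter.mp he1).2, he2⟩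
  obtain ⟨hecont, hegetD⟩ := hei
  obtain ⟨i, hi⟩ : ∃ i, wher.get? e = some i := by
    have := PySem.Dict.contains_eq_isSome_get? (d := wher) (k := e)
    rw [hecont] at this
    exact Option.isSome_iff_exists.mp this.symm
  have him : i = m := by rw [hi] at hegetD; simpa using hegetD
  obtain ⟨n, hn, ⟨⟨g, hg, heg⟩, hleast⟩⟩ := (hW e).2 i hi
  refine ⟨n, g, ?_, hg, ⟨e, hech, heg⟩, ?_⟩
  · rw [hm]
    simp [← hn, him]
  · intro j hj g' hg' e' he'ch he'g'
    -- e' lies in group j, so its where-entry is ≤ j, hence m ≤ j; but j < n = m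
    obtain ⟨i', hi'⟩ : ∃ i', wher.get? e' = some i' := by
      rcases hcase : wher.get? e' with _ | i'
      · exact absurd he'g' ((hW e').1 hcase j g' hg')
      · exact ⟨i', rfl⟩
    obtain ⟨n', hn', ⟨_, hleast'⟩⟩ := (hW e').2 i' hi'
    have hn'le : n' ≤ j := by
      by_contra hlt
      exact hleast' j (by omega) g' hg' he'g'
    have hi'hits : i' ∈ bHits wher ch := by
      apply List.mem_map.mpr
      refine ⟨e', List.mem_filter.mpr ⟨he'ch, ?_⟩, by simp [hi']⟩
      have := PySem.Dict.contains_eq_isSome_get? (d := wher) (k := e')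
      simp [hi'] at this
      simpa using this
    have := hmle i' hi'hits
    -- m = i = n, i' = n' ≤ j < n : contradiction
    omega

-- A's merge equals B's merge and preserves the where-invariant: the append case
theorem pv_merge_nil (groups : List (PySem.Set Int)) (wher : PySem.Dict Int Int) (ch : List Int)
    (hW : WhereInv groups wher) (h : bHits wher ch = []) :
    aMerge groups (PySem.Set.ofList ch) = groups ++ [PySem.Set.ofList ch] ∧
    WhereInv (groups ++ [PySem.Set.ofList ch])
      (ch.foldl (fun w e => w.insert e ((groups.length : Int))) wher) := by
  have hdisj := pv_hits_nil groups wher ch hW h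
  constructor
  · rw [aMerge]
    by_cases hg : groups = []
    · rw [if_pos hg]
    · rw [if_neg hg, pv_aMergeScan_no_overlap ch (PySem.Set.ofList ch)
        (fun e => PySem.Set.mem_ofList ch e) groups [] ?_]
      · simp
      · intro g hgmem e he
        obtain ⟨j, hj⟩ := List.mem_iff_getElem?.mp hgmem
        exact hdisj j g hj e he
  · intro e
    rw [pv_get?_foldl_insert_const]
    by_cases hech : e ∈ ch
    · rw [if_pos hech]
      refine ⟨fun hnone => by simp at hnone, fun i hi => ?_⟩
      have hi' : i = (groups.length : Int) := (Option.some.inj hi).symm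
      refine ⟨groups.length, hi', ⟨⟨PySem.Set.ofList ch, ?_, (PySem.Set.mem_ofList ch e).mpr hech⟩, ?_⟩⟩
      · rw [List.getElem?_append_right (le_refl _)]
        simp
      · intro j hj g hjg
        rw [List.getElem?_append_left hj] at hjg
        exact hdisj j g hjg e hech
    · rw [if_neg hech]
      constructor
      · intro hnone j g hj hcontra
        rcases Nat.lt_or_ge j groups.length with hlt | hge
        · rw [List.getElem?_append_left hlt] at hj
          exact (hW e).1 hnone j g hj hcontra
        · rw [List.getElem?_append_right hge] at hj
          rcases Nat.lt_or_ge (j - groups.length) 1 with h0 | h1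
          · have h0' : j - groups.length = 0 := by omega
            rw [h0'] at hj
            simp at hj
            rw [← hj] at hcontra
            exact hech ((PySem.Set.mem_ofList ch e).mp hcontra)
          · rw [List.getElem?_eq_none_iff.mpr (by simpa using h1)] at hj
            cases hj
      · intro i hi
        obtain ⟨n, hn, ⟨⟨g0, hg0, heg0⟩, hleast⟩⟩ := (hW e).2 i hi
        have hnlt : n < groups.length := by
          by_contra hcon
          rw [List.getElem?_eq_none_iff.mpr (by omega)] at hg0
          cases hg0
        refine ⟨n, hn, ⟨⟨g0, ?_, heg0⟩, ?_⟩⟩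
        · rw [List.getElem?_append_left hnlt]
          exact hg0
        · intro j hj g' hj'
          rw [List.getElem?_append_left (by omega)] at hj'
          exact hleast j hj g' hj'

-- A's merge equals B's merge and preserves the where-invariant: the overlap case
theorem pv_merge_hits (groups : List (PySem.Set Int)) (wher : PySem.Dict Int Int) (ch : List Int)
    (hW : WhereInv groups wher) (h : bHits wher ch ≠ []) :
    ∃ n : Nat, (PySem.List.min? (bHits wher ch) (fun x => x)).getD 0 = (n : Int) ∧
    aMerge groups (PySem.Set.ofList ch) =
      PySem.List.pySetD groups ((n : Int))
        (PySem.Set.union (PySem.List.pyGetD groups ((n : Int)) []) (PySem.Set.ofList ch)) ∧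
    WhereInv (PySem.List.pySetD groups ((n : Int))
        (PySem.Set.union (PySem.List.pyGetD groups ((n : Int)) []) (PySem.Set.ofList ch)))
      (ch.foldl (fun w e => w.insert e ((n : Int))) wher) := by
  obtain ⟨n, g, htgt, hg, hov, hpre⟩ := pv_hits_min groups wher ch hW h
  have hnlt : n < groups.length := by
    by_contra hcon
    rw [List.getElem?_eq_none_iff.mpr (by omega)] at hg
    cases hg
  have hgetD : PySem.List.pyGetD groups ((n : Int)) [] = g := by
    rw [PySem.List.pyGetD_natCast, List.getD_eq_getElem?_getD, hg]
    rfl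
  have hsetD : PySem.List.pySetD groups ((n : Int))
      (PySem.Set.union (PySem.List.pyGetD groups ((n : Int)) []) (PySem.Set.ofList ch))
      = groups.set n (PySem.Set.union g (PySem.Set.ofList ch)) := by
    rw [hgetD, PySem.List.pySetD_natCast]
  refine ⟨n, htgt, ?_, ?_⟩
  · rw [hsetD, aMerge, if_neg (by intro hnil; rw [hnil] at hg; cases hg)]
    rw [pv_aMergeScan_first_overlap ch (PySem.Set.ofList ch) (fun e => PySem.Set.mem_ofList ch e)
      groups n [] g hg hov hpre]
    simp
  · rw [hsetD]
    intro e
    rw [pv_get?_foldl_insert_const]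
    by_cases hech : e ∈ ch
    · rw [if_pos hech]
      refine ⟨fun hnone => by simp at hnone, fun i hi => ?_⟩
      have hi' : i = (n : Int) := (Option.some.inj hi).symm
      refine ⟨n, hi', ⟨⟨PySem.Set.union g (PySem.Set.ofList ch), ?_, ?_⟩, ?_⟩⟩
      · rw [List.getElem?_set, if_pos rfl, if_pos hnlt]
      · exact (PySem.Set.mem_union g _ e).mpr (Or.inr ((PySem.Set.mem_ofList ch e).mpr hech))
      · intro j hj g' hjg
        rw [List.getElem?_set, if_neg (by omega)] at hjg
        exact hpre j hj g' hjg e hech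
    · rw [if_neg hech]
      constructor
      · intro hnone j g' hj hcontra
        rcases eq_or_ne j n with rfl | hjn
        · rw [List.getElem?_set, if_pos rfl, if_pos hnlt] at hj
          have hj' : g' = PySem.Set.union g (PySem.Set.ofList ch) := (Option.some.inj hj).symm
          rw [hj'] at hcontra
          rcases (PySem.Set.mem_union g _ e).mp hcontra with hcg | hcch
          · exact (hW e).1 hnone j g hg hcg
          · exact hech ((PySem.Set.mem_ofList ch e).mp hcch)
        · rw [List.getElem?_set, if_neg (by omega)] at hj
          exact (hW e).1 hnone j g' hj hcontra
      · intro i hi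
        obtain ⟨m, hm, ⟨⟨g0, hg0, heg0⟩, hleast⟩⟩ := (hW e).2 i hi
        refine ⟨m, hm, ⟨⟨if m = n then PySem.Set.union g (PySem.Set.ofList ch) else g0, ?_, ?_⟩, ?_⟩⟩
        · by_cases hmn : m = n
          · rw [if_pos hmn, hmn, List.getElem?_set, if_pos rfl, if_pos hnlt]
          · rw [if_neg hmn, List.getElem?_set, if_neg (by omega)]
            exact hg0
        · by_cases hmn : m = n
          · rw [if_pos hmn]
            have : g0 = g := by
              rw [hmn] at hg0
              exact Option.some.inj (hg0.symm.trans hg)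
            rw [← this] at *
            exact (PySem.Set.mem_union g0 _ e).mpr (Or.inl heg0)
          · rw [if_neg hmn]
            exact heg0
        · intro j hj g' hjg
          rcases eq_or_ne j n with rfl | hjn
          · rw [List.getElem?_set, if_pos rfl, if_pos hnlt] at hjg
            have hj' : g' = PySem.Set.union g (PySem.Set.ofList ch) := (Option.some.inj hjg).symm
            rw [hj']
            intro hcontra
            rcases (PySem.Set.mem_union g _ e).mp hcontra with hcg | hcch
            · exact hleast j hj g hg hcg
            · exact hech ((PySem.Set.mem_ofList ch e).mp hcch)
          · rw [List.getElem?_set, if_neg (by omega)] at hjg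
            exact hleast j hj g' hjg

-- ---------- chain lemma and main lemma ----------

theorem pv_dk_erase (keys0 : List Int) (hnd : keys0.Nodup) (consumed : PySem.Set Int) (key : Int)
    (hkey : key ∈ keys0.filter (fun x => !(PySem.Set.contains consumed x))) :
    (PySem.List.remove? (keys0.filter (fun x => !(PySem.Set.contains consumed x))) key).getD
        (keys0.filter (fun x => !(PySem.Set.contains consumed x)))
      = keys0.filter (fun x => !(PySem.Set.contains (PySem.Set.add consumed key) x)) := by
  rw [pv_remove?_getD_of_mem _ _ hkey, (hnd.filter _).erase_eq_filter key, pv_filter_add_consumed]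

theorem pv_length_filter_add (keys0 : List Int) (hnd : keys0.Nodup) (consumed : PySem.Set Int)
    (key : Int) (hkey : key ∈ keys0.filter (fun x => !(PySem.Set.contains consumed x))) :
    (keys0.filter (fun x => !(PySem.Set.contains (PySem.Set.add consumed key) x))).length
      = (keys0.filter (fun x => !(PySem.Set.contains consumed x))).length - 1 := by
  rw [← pv_filter_add_consumed, ← (hnd.filter _).erase_eq_filter key, List.length_erase, if_pos hkey]

theorem pv_cond_eq (keys0 : List Int) (substs0 : PySem.Dict Int Int) (hk : keys0 = substs0.keys)
    (c : PySem.Set Int) (v : Int) :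
    (keys0.filter (fun x => !(PySem.Set.contains c x))).contains v
      = (substs0.contains v && !(PySem.Set.contains c v)) := by
  rw [Bool.eq_iff_iff]
  constructor
  · intro hmem
    have hv : v ∈ keys0 ∧ ¬ v ∈ c := by simpa using hmem
    refine (Bool.and_eq_true _ _).mpr ⟨(PySem.Dict.contains_iff_mem_keys _ _).mpr (hk ▸ hv.1), ?_⟩
    cases hcc : PySem.Set.contains c v with
    | false => rfl
    | true => exact absurd ((PySem.Set.contains_iff _ _).mp hcc) hv.2
  · intro hand
    obtain ⟨h1, h2⟩ := (Bool.and_eq_true _ _).mp hand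
    have hv : v ∈ keys0 := hk ▸ (PySem.Dict.contains_iff_mem_keys _ _).mp h1
    have hnc : ¬ v ∈ c := by
      intro hm
      rw [(PySem.Set.contains_iff _ _).mpr hm] at h2
      cases h2
    simpa using And.intro hv hnc

theorem pv_chain (keys0 : List Int) (substs0 : PySem.Dict Int Int)
    (hk : keys0 = substs0.keys) (hnd : keys0.Nodup) :
    ∀ (fB fA : Nat) (consumed : PySem.Set Int) (sA : PySem.Dict Int Int)
      (dl : List (PySem.Set Int)) (ch : List Int) (key : Int),
      (∀ x, PySem.Set.contains consumed x = false → sA.get? x = substs0.get? x) →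
      key ∈ keys0.filter (fun x => !(PySem.Set.contains consumed x)) →
      ch.getLast? = some key →
      (keys0.filter (fun x => !(PySem.Set.contains consumed x))).length + 1 ≤ fA →
      (keys0.filter (fun x => !(PySem.Set.contains consumed x))).length ≤ fB →
      ∃ (sA' : PySem.Dict Int Int) (fA' : Nat),
        (∀ x, PySem.Set.contains (bChain fB consumed substs0 ch).2 x = false →
          sA'.get? x = substs0.get? x) ∧
        (∀ x, x ∈ consumed → x ∈ (bChain fB consumed substs0 ch).2) ∧
        key ∈ (bChain fB consumed substs0 ch).2 ∧
        (bChain fB consumed substs0 ch).1 ≠ [] ∧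
        (keys0.filter (fun x => !(PySem.Set.contains (bChain fB consumed substs0 ch).2 x))).length + 1 ≤ fA' ∧
        aLoop fA (keys0.filter (fun x => !(PySem.Set.contains consumed x))) sA dl key ch =
          (match (keys0.filter (fun x => !(PySem.Set.contains (bChain fB consumed substs0 ch).2 x))).getLast? with
           | none => aMerge dl (PySem.Set.ofList (bChain fB consumed substs0 ch).1)
           | some k2 =>
             aLoop fA' (keys0.filter (fun x => !(PySem.Set.contains (bChain fB consumed substs0 ch).2 x)))
               sA' (aMerge dl (PySem.Set.ofList (bChain fB consumed substs0 ch).1)) k2 [k2]) := by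
  intro fB
  induction fB with
  | zero =>
    intro fA consumed sA dl ch key hrel hkey hlast hfa hfb
    have hlen : 0 < (keys0.filter (fun x => !(PySem.Set.contains consumed x))).length :=
      List.length_pos_iff.mpr (List.ne_nil_of_mem hkey)
    omega
  | succ fB ih =>
    intro fA consumed sA dl ch key hrel hkey hlast hfa hfb
    obtain ⟨hkmem, hknc⟩ := List.mem_filter.mp hkey
    have hknc' : PySem.Set.contains consumed key = false := by simpa using hknc
    have hdkne : keys0.filter (fun x => !(PySem.Set.contains consumed x)) ≠ [] :=
      List.ne_nil_of_mem hkey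
    have hdklen : 0 < (keys0.filter (fun x => !(PySem.Set.contains consumed x))).length :=
      List.length_pos_iff.mpr hdkne
    cases fA with
    | zero => omega
    | succ fA =>
      rcases hv : substs0.get? key with _ | v
      · rw [PySem.Dict.get?_eq_none_iff_not_mem_keys] at hv
        exact absurd (hk ▸ hkmem) hv
      · have hchne : ch ≠ [] := by
          intro hnil
          rw [hnil] at hlast
          simp at hlast
        -- one step of B's chain loop
        have hBstep : bChain (fB+1) consumed substs0 ch
            = if substs0.contains v && !(PySem.Set.contains (PySem.Set.add consumed key) v)
              then bChain fB (PySem.Set.add consumed key) substs0 (ch ++ [v])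
              else (ch ++ [v], PySem.Set.add consumed key) := by
          simp only [bChain, pv_pyGet_neg_one ch hchne, hlast, Option.getD_some, hv]
        -- one step of A's loop
        have hvalA : (sA.get? key).getD 0 = v := by
          rw [hrel key hknc', hv]
          rfl
        have hdk1 := pv_dk_erase keys0 hnd consumed key hkey
        have hAstep : aLoop (fA+1) (keys0.filter (fun x => !(PySem.Set.contains consumed x))) sA dl key ch
            = if (keys0.filter (fun x => !(PySem.Set.contains (PySem.Set.add consumed key) x))).contains v
              then aLoop fA (keys0.filter (fun x => !(PySem.Set.contains (PySem.Set.add consumed key) x)))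
                (sA.erase key) dl v (ch ++ [v])
              else
                (match (keys0.filter (fun x => !(PySem.Set.contains (PySem.Set.add consumed key) x))).getLast? with
                 | none => aMerge dl (PySem.Set.ofList (ch ++ [v]))
                 | some k2 =>
                   aLoop fA (keys0.filter (fun x => !(PySem.Set.contains (PySem.Set.add consumed key) x)))
                     (sA.erase key) (aMerge dl (PySem.Set.ofList (ch ++ [v]))) k2 [k2]) := by
          simp only [aLoop, if_neg hdkne, hvalA, hdk1]
        have hcond := pv_cond_eq keys0 substs0 hk (PySem.Set.add consumed key) v
        have hlen1 := pv_length_filter_add keys0 hnd consumed key hkey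
        -- the erased dict still agrees with substs0 outside the new consumed set
        have hrel1 : ∀ x, PySem.Set.contains (PySem.Set.add consumed key) x = false →
            (sA.erase key).get? x = substs0.get? x := by
          intro x hx
          have hxmem : ¬ x ∈ PySem.Set.add consumed key := by
            intro hmem
            rw [(PySem.Set.contains_iff _ _).mpr hmem] at hx
            cases hx
          have hxk : x ≠ key := fun hxeq => hxmem ((PySem.Set.mem_add _ _ _).mpr (Or.inr hxeq))
          have hxc : PySem.Set.contains consumed x = false := by
            cases hcc : PySem.Set.contains consumed x with
            | false => rfl
            | true =>
              exact absurd ((PySem.Set.mem_add _ _ _).mpr (Or.inl ((PySem.Set.contains_iff _ _).mp hcc))) hxmem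
          rw [pv_get?_erase, if_neg hxk, hrel x hxc]
        cases hc : (substs0.contains v && !(PySem.Set.contains (PySem.Set.add consumed key) v)) with
        | true =>
          have hBC : bChain (fB+1) consumed substs0 ch
              = bChain fB (PySem.Set.add consumed key) substs0 (ch ++ [v]) := by
            rw [hBstep, hc]
            exact if_pos rfl
          have hkey1 : v ∈ keys0.filter (fun x => !(PySem.Set.contains (PySem.Set.add consumed key) x)) := by
            have hcv := hcond.trans hc
            have : v ∈ keys0 ∧ ¬ v ∈ PySem.Set.add consumed key := by simpa using hcv
            simpa using this
          obtain ⟨sA', fA', h1, h2, h3, h4, h5, h6⟩ :=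
            ih fA (PySem.Set.add consumed key) (sA.erase key) dl (ch ++ [v]) v hrel1 hkey1
              (List.getLast?_concat) (by omega) (by omega)
          rw [hBC]
          refine ⟨sA', fA', h1, ?_, ?_, h4, h5, ?_⟩
          · intro x hx
            exact h2 x ((PySem.Set.mem_add _ _ _).mpr (Or.inl hx))
          · exact h2 key ((PySem.Set.mem_add _ _ _).mpr (Or.inr rfl))
          · rw [hAstep, hcond, hc, if_pos rfl]
            exact h6
        | false =>
          have hBC : bChain (fB+1) consumed substs0 ch = (ch ++ [v], PySem.Set.add consumed key) := by
            rw [hBstep, hc]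
            exact if_neg (by simp)
          rw [hBC]
          refine ⟨sA.erase key, fA, hrel1, ?_, ?_, by simp, ?_, ?_⟩
          · intro x hx
            exact (PySem.Set.mem_add _ _ _).mpr (Or.inl hx)
          · exact (PySem.Set.mem_add _ _ _).mpr (Or.inr rfl)
          · show (keys0.filter (fun x => !(PySem.Set.contains (PySem.Set.add consumed key) x))).length + 1 ≤ fA
            omega
          · rw [hAstep, hcond, hc, if_neg (by simp)]

theorem pv_bStep_unfold (substs : PySem.Dict Int Int) (fuel : Nat)
    (groups : List (PySem.Set Int)) (wher : PySem.Dict Int Int) (consumed : PySem.Set Int)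
    (k : Int) (hc : PySem.Set.contains consumed k = false) :
    bStep substs fuel (groups, wher, consumed) k =
      (if bHits wher (bChain fuel consumed substs [k]).1 ≠ [] then
        (PySem.List.pySetD groups
            ((PySem.List.min? (bHits wher (bChain fuel consumed substs [k]).1) (fun x => x)).getD 0)
            (PySem.Set.union
              (PySem.List.pyGetD groups
                ((PySem.List.min? (bHits wher (bChain fuel consumed substs [k]).1) (fun x => x)).getD 0) [])
              (PySem.Set.ofList (bChain fuel consumed substs [k]).1)),
          (bChain fuel consumed substs [k]).1.foldl
            (fun w e => w.insert e
              ((PySem.List.min? (bHits wher (bChain fuel consumed substs [k]).1) (fun x => x)).getD 0)) wher,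
          (bChain fuel consumed substs [k]).2)
      else
        (groups ++ [PySem.Set.ofList (bChain fuel consumed substs [k]).1],
          (bChain fuel consumed substs [k]).1.foldl
            (fun w e => w.insert e ((groups.length : Int))) wher,
          (bChain fuel consumed substs [k]).2)) := by
  simp only [bStep]
  rw [if_neg (fun hmm => by rw [hc] at hmm; cases hmm)]

theorem pv_main (keys0 : List Int) (substs0 : PySem.Dict Int Int)
    (hk : keys0 = substs0.keys) (hnd : keys0.Nodup) :
    ∀ (rest done : List Int) (consumed : PySem.Set Int)
      (groups : List (PySem.Set Int)) (wher sA : PySem.Dict Int Int) (fA : Nat),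
      keys0.reverse = done ++ rest →
      (∀ x ∈ done, x ∈ consumed) →
      (∀ x, PySem.Set.contains consumed x = false → sA.get? x = substs0.get? x) →
      WhereInv groups wher →
      (keys0.filter (fun x => !(PySem.Set.contains consumed x))).length + 1 ≤ fA →
      (match (keys0.filter (fun x => !(PySem.Set.contains consumed x))).getLast? with
       | none => groups
       | some k => aLoop fA (keys0.filter (fun x => !(PySem.Set.contains consumed x))) sA groups k [k])
      = (rest.foldl (bStep substs0 (substs0.size + 1)) (groups, wher, consumed)).1 := by
  intro rest
  induction rest with
  | nil =>
    intro done consumed groups wher sA fA hrev hdone hrel hW hfa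
    have hfil : keys0.filter (fun x => !(PySem.Set.contains consumed x)) = [] := by
      rw [List.filter_eq_nil_iff]
      intro x hxmem
      have hxd : x ∈ done := by
        have : x ∈ keys0.reverse := List.mem_reverse.mpr hxmem
        rw [hrev] at this
        simpa using this
      simp [PySem.Set.contains, hdone x hxd]
    rw [hfil]
    simp
  | cons k rest' ih =>
    intro done consumed groups wher sA fA hrev hdone hrel hW hfa
    rw [List.foldl_cons]
    have hrev' : keys0.reverse = (done ++ [k]) ++ rest' := by
      rw [hrev]
      simp
    cases hc : PySem.Set.contains consumed k with
    | true =>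
      have hbs : bStep substs0 (substs0.size+1) (groups, wher, consumed) k = (groups, wher, consumed) := by
        simp only [bStep]
        rw [if_pos hc]
      rw [hbs]
      refine ih (done ++ [k]) consumed groups wher sA fA hrev' ?_ hrel hW hfa
      intro x hx
      rcases List.mem_append.mp hx with h | h
      · exact hdone x h
      · have hxk : x = k := by simpa using h
        exact hxk ▸ (PySem.Set.contains_iff _ _).mp hc
    | false =>
      have hkmem : k ∈ keys0 := by
        have : k ∈ keys0.reverse := by rw [hrev]; simp
        exact List.mem_reverse.mp this
      have hknotc : k ∉ consumed := fun h => by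
        rw [(PySem.Set.contains_iff _ _).mpr h] at hc
        cases hc
      have hlastk := pv_getLast?_filter keys0 done rest' consumed k hrev hdone hknotc
      have hkfil : k ∈ keys0.filter (fun x => !(PySem.Set.contains consumed x)) :=
        List.mem_filter.mpr ⟨hkmem, by simpa using hknotc⟩
      have hsz : (keys0.filter (fun x => !(PySem.Set.contains consumed x))).length ≤ substs0.size + 1 := by
        have h1 := List.length_filter_le (fun x => !(PySem.Set.contains consumed x)) keys0
        have h2 : keys0.length = substs0.size := by
          rw [hk]
          simp [PySem.Dict.keys, PySem.Dict.size]
        omega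
      obtain ⟨sA', fA', hrel', hmono, hkeyc, hchne, hfa', heq⟩ :=
        pv_chain keys0 substs0 hk hnd (substs0.size+1) fA consumed sA groups [k] k hrel hkfil rfl hfa hsz
      rw [hlastk,
        show (match (some k : Option Int) with
           | none => groups
           | some k2 => aLoop fA (keys0.filter (fun x => !(PySem.Set.contains consumed x))) sA groups k2 [k2])
          = aLoop fA (keys0.filter (fun x => !(PySem.Set.contains consumed x))) sA groups k [k] from rfl,
        heq, pv_bStep_unfold substs0 (substs0.size+1) groups wher consumed k hc]
      have hdone' : ∀ x ∈ done ++ [k], x ∈ (bChain (substs0.size+1) consumed substs0 [k]).2 := by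
        intro x hx
        rcases List.mem_append.mp hx with h | h
        · exact hmono x (hdone x h)
        · have hxk : x = k := by simpa using h
          exact hxk ▸ hkeyc
      by_cases hhits : bHits wher (bChain (substs0.size+1) consumed substs0 [k]).1 = []
      · rw [if_neg (fun hne => hne hhits)]
        obtain ⟨hmerge, hW'⟩ :=
          pv_merge_nil groups wher (bChain (substs0.size+1) consumed substs0 [k]).1 hW hhits
        rw [hmerge]
        exact ih (done ++ [k]) (bChain (substs0.size+1) consumed substs0 [k]).2
          (groups ++ [PySem.Set.ofList (bChain (substs0.size+1) consumed substs0 [k]).1])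
          ((bChain (substs0.size+1) consumed substs0 [k]).1.foldl
            (fun w e => w.insert e ((groups.length : Int))) wher) sA' fA'
          hrev' hdone' hrel' hW' hfa'
      · rw [if_pos hhits]
        obtain ⟨n, htgt, hmerge, hW'⟩ :=
          pv_merge_hits groups wher (bChain (substs0.size+1) consumed substs0 [k]).1 hW hhits
        rw [htgt, hmerge]
        exact ih (done ++ [k]) (bChain (substs0.size+1) consumed substs0 [k]).2
          (PySem.List.pySetD groups ((n : Int))
            (PySem.Set.union (PySem.List.pyGetD groups ((n : Int)) [])
              (PySem.Set.ofList (bChain (substs0.size+1) consumed substs0 [k]).1)))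
          ((bChain (substs0.size+1) consumed substs0 [k]).1.foldl
            (fun w e => w.insert e ((n : Int))) wher) sA' fA'
          hrev' hdone' hrel' hW' hfa'

-- ===== VERDICT (by name: the statement is the Claim_ definition above) =====
theorem pv_keys_ofList (l : List (Int × Int)) :
    (PySem.Dict.ofList l : PySem.Dict Int Int).keys = PySem.Set.ofList (l.map Prod.fst) := by
  have h := PySem.Dict.keys_foldl_insert_key (ν := Int) l (fun p => p.1) (fun d p => p.2)
    PySem.Dict.empty
  have h2 : (PySem.Dict.ofList l : PySem.Dict Int Int).keys
      = PySem.Set.update (PySem.Dict.empty : PySem.Dict Int Int).keys (l.map (fun p => p.1)) := by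
    exact h
  rw [h2]
  rw [show (PySem.Dict.empty : PySem.Dict Int Int).keys = [] from rfl]
  rw [PySem.Set.update_nil_left]

theorem pv_WhereInv_init : WhereInv [] PySem.Dict.empty := by
  intro e
  constructor
  · intro _ j g hj
    simp at hj
  · intro i hi
    rw [PySem.Dict.get?_empty] at hi
    cases hi

theorem delta_map_py_spec : Claim_equal_delta_map_py := by
  intro l _hDom hPre
  show delta_map_py l = delta_map_py_alt l
  have hnd := PySem.Dict.nodup_keys_ofList l
  have hkeysne : (PySem.Dict.ofList l : PySem.Dict Int Int).keys ≠ [] := by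
    rw [pv_keys_ofList]
    rcases l with _ | ⟨p, l'⟩
    · exact absurd rfl hPre
    · refine List.ne_nil_of_mem (a := p.1) ((PySem.Set.mem_ofList _ _).mpr ?_)
      simp
  obtain ⟨kl, hkl⟩ : ∃ kl, (PySem.Dict.ofList l : PySem.Dict Int Int).keys.getLast? = some kl := by
    rcases hgl : (PySem.Dict.ofList l : PySem.Dict Int Int).keys.getLast? with _ | kl
    · rw [List.getLast?_eq_none_iff] at hgl
      exact absurd hgl hkeysne
    · exact ⟨kl, rfl⟩
  have hfe : (PySem.Dict.ofList l : PySem.Dict Int Int).keys.filter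
      (fun x => !(PySem.Set.contains PySem.Set.empty x)) = (PySem.Dict.ofList l).keys := by
    simp [PySem.Set.contains, PySem.Set.empty]
  have hmain := pv_main (PySem.Dict.ofList l).keys (PySem.Dict.ofList l) rfl hnd
    ((PySem.Dict.ofList l).keys.reverse) [] PySem.Set.empty [] PySem.Dict.empty
    (PySem.Dict.ofList l) ((PySem.Dict.ofList l).keys.length + 1)
    (by simp) (by simp) (fun x _ => rfl) pv_WhereInv_init
    (by rw [hfe])
  rw [hfe, hkl] at hmain
  simp only [delta_map_py, delta_map_py_alt]
  rw [pv_pyGet_neg_one _ hkeysne, hkl]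
  simp only [Option.getD_some]
  exact hmain
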